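-- pv_equiv track=rewrite | github.com/hotel-risk-bot/hotel-risk-bot | marketing_update_generator.py | _get_generic_metrics
-- ===== SOURCE A (Python) =====
-- def _get_generic_metrics(carriers_data, is_internal=True):
--     metrics = ["Premium"]
--     all_values = {}
--     for c in carriers_data:
--         for k, v in c["values"].items():
--             if k not in all_values:
--                 all_values[k] = []
--             all_values[k].append(v)
--     # Add metrics that have data (available on all versions)
--     optional = ["# of Units", "# of Locations", "Gross Sales", "Limit", "Flood Limit", "Flood Deductible",
--                 "Building Limit", "BPP Limit", "Retention", "Broker"]
--     for m in optional:
--         if m in all_values and any(v != "\u2014" for v in all_values[m]):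
--             metrics.append(m)
--     # Internal-only metrics
--     if is_internal:
--         for m in ["Commission", "Revenue"]:
--             if m in all_values and any(v != "\u2014" for v in all_values[m]):
--                 metrics.append(m)
--     return metrics
-- ===== SOURCE B (Python) =====
-- def _get_generic_metrics(carriers_data, is_internal=True):
--     # No intermediate index at all: a flagged label table drives one comprehension,
--     # and each label is tested by a direct short-circuiting scan over the raw data.
--     def has_data(label):
--         return any(v != "\u2014"
--                    for c in carriers_data
--                    for k, v in c["values"].items()
--                    if k == label)
--     labels = [("# of Units", False), ("# of Locations", False), ("Gross Sales", False),
--               ("Limit", False), ("Flood Limit", False), ("Flood Deductible", False),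
--               ("Building Limit", False), ("BPP Limit", False), ("Retention", False),
--               ("Broker", False), ("Commission", True), ("Revenue", True)]
--     return ["Premium"] + [m for m, internal_only in labels
--                           if (is_internal or not internal_only) and has_data(m)]
-- ===== Notes on version B (the rewrite author's own statement) =====
-- stated objective: alternative
-- what changed: Drops A's dict-of-value-lists index entirely: B keeps a single flagged label table (label, internal_only) and decides each label by a direct short-circuiting scan over the raw carrier data, emitting the result in one comprehension instead of A's build-index-then-two-filter-loops staging.
import Mathlib
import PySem

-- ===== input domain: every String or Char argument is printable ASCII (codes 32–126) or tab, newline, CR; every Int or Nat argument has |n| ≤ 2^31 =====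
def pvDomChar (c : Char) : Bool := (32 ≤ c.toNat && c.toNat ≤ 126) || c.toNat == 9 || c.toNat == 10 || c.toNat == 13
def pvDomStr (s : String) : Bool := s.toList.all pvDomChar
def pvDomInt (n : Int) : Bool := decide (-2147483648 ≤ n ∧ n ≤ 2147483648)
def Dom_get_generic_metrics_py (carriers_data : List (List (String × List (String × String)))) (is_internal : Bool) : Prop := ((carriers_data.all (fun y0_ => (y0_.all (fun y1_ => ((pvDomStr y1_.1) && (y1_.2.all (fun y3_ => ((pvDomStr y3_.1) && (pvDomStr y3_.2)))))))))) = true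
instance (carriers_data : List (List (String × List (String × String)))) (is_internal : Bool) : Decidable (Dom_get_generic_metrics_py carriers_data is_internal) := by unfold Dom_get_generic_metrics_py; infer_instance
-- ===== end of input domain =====

-- B drops A's dict-of-value-lists index: a flagged label table plus a direct
-- short-circuiting scan of the raw data per label, emitted by one comprehension.

-- shared reading of `c["values"].items()` (both Pythons contain this very expression):
-- the carrier dict and its "values" dict are normalised Python-exactly via PySem.Dict.ofList
def pvItems (c : List (String × List (String × String))) : List (String × String) :=
  (PySem.Dict.ofList ((PySem.Dict.ofList c).getD "values" [])).items
-- (getD with default [] is exact under Pre_, which guarantees the "values" key is present)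

def pvOptional : List String :=
  ["# of Units", "# of Locations", "Gross Sales", "Limit", "Flood Limit",
   "Flood Deductible", "Building Limit", "BPP Limit", "Retention", "Broker"]

-- ===== PORT A =====
def get_generic_metrics_py (carriers_data : List (List (String × List (String × String)))) (is_internal : Bool) : List String :=
  let all_values : PySem.Dict String (List String) :=
    carriers_data.foldl
      (fun d c => (pvItems c).foldl (fun d p => d.modify p.1 [] (· ++ [p.2])) d)
      PySem.Dict.empty
  let metrics :=
    pvOptional.foldl
      (fun ms m => if all_values.contains m && (all_values.getD m []).any (fun v => !(v == "—")) then ms ++ [m] else ms)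
      ["Premium"]
  if is_internal then
    ["Commission", "Revenue"].foldl
      (fun ms m => if all_values.contains m && (all_values.getD m []).any (fun v => !(v == "—")) then ms ++ [m] else ms)
      metrics
  else metrics

-- ===== PORT B =====
-- Source B's has_data(label): a lazy any over all (k, v) pairs of all carriers with k == label
def pvHasData (carriers_data : List (List (String × List (String × String)))) (label : String) : Bool :=
  carriers_data.any (fun c => (pvItems c).any (fun p => p.1 == label && !(p.2 == "—")))

-- Source B's flagged label table (label, internal_only)
def pvLabels : List (String × Bool) :=
  [("# of Units", false), ("# of Locations", false), ("Gross Sales", false),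
   ("Limit", false), ("Flood Limit", false), ("Flood Deductible", false),
   ("Building Limit", false), ("BPP Limit", false), ("Retention", false),
   ("Broker", false), ("Commission", true), ("Revenue", true)]

def get_generic_metrics_py_alt (carriers_data : List (List (String × List (String × String)))) (is_internal : Bool) : List String :=
  ["Premium"] ++
    (pvLabels.filter (fun l => (is_internal || !l.2) && pvHasData carriers_data l.1)).map (·.1)

-- ===== PRECONDITION & SPEC =====
-- Pre_ excludes exactly the carriers without a "values" key, on which Python A raises KeyError.
def Pre_get_generic_metrics_py (carriers_data : List (List (String × List (String × String)))) (is_internal : Bool) : Prop :=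
  ∀ c ∈ carriers_data, (PySem.Dict.ofList c).contains "values" = true
instance (carriers_data : List (List (String × List (String × String)))) (is_internal : Bool) : Decidable (Pre_get_generic_metrics_py carriers_data is_internal) := by unfold Pre_get_generic_metrics_py; infer_instance

def pvWitness_get_generic_metrics_py : (List (List (String × List (String × String)))) × Bool :=
  ([[("values", [("Limit", "5"), ("Broker", "x")])]], true)

def Spec_get_generic_metrics_py (carriers_data : List (List (String × List (String × String)))) (is_internal : Bool) (out : List String) : Prop := out = get_generic_metrics_py_alt carriers_data is_internal
instance (carriers_data : List (List (String × List (String × String)))) (is_internal : Bool) (out : List String) : Decidable (Spec_get_generic_metrics_py carriers_data is_internal out) := by unfold Spec_get_generic_metrics_py; infer_instance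

-- ===== CLAIM =====
def Claim_equal_get_generic_metrics_py : Prop := ∀ (carriers_data : List (List (String × List (String × String)))) (is_internal : Bool), Dom_get_generic_metrics_py carriers_data is_internal → Pre_get_generic_metrics_py carriers_data is_internal → Spec_get_generic_metrics_py carriers_data is_internal (get_generic_metrics_py carriers_data is_internal)

-- ===== LEMMAS AND PROOFS =====

-- A's grouping dict, looked up at m, is the concatenation of all values filed under m
theorem buildA_getD (cd : List (List (String × List (String × String))))
    (d : PySem.Dict String (List String)) (m : String) :
    (cd.foldl (fun d c => (pvItems c).foldl (fun d p => d.modify p.1 [] (· ++ [p.2])) d) d).getD m []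
      = d.getD m [] ++ cd.flatMap (fun c => ((pvItems c).filter (fun p => p.1 == m)).map (·.2)) := by
  induction cd generalizing d with
  | nil => simp
  | cons c rest ih =>
      simp only [List.foldl_cons, List.flatMap_cons, ih, PySem.Dict.getD_foldl_modify_append,
        List.append_assoc]

-- the dict test A performs on a label equals B's direct scan of the raw data
theorem cond_eq (cd : List (List (String × List (String × String)))) (m : String) :
    ((cd.foldl (fun d c => (pvItems c).foldl (fun d p => d.modify p.1 [] (· ++ [p.2])) d) PySem.Dict.empty).contains m
       && ((cd.foldl (fun d c => (pvItems c).foldl (fun d p => d.modify p.1 [] (· ++ [p.2])) d) PySem.Dict.empty).getD m []).any (fun v => !(v == "—")))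
      = pvHasData cd m := by
  have hA := buildA_getD cd PySem.Dict.empty m
  rw [PySem.Dict.getD_empty, List.nil_append] at hA
  have hB : pvHasData cd m = decide (∃ c ∈ cd, ∃ p ∈ pvItems c, p.1 = m ∧ p.2 ≠ "—") := by
    rw [Bool.eq_iff_iff, decide_eq_true_iff]
    simp only [pvHasData, List.any_eq_true, Bool.and_eq_true, beq_iff_eq, Bool.not_eq_true',
      beq_eq_false_iff_ne, ne_eq]
  rw [hB]
  rcases h : (cd.foldl (fun d c => (pvItems c).foldl (fun d p => d.modify p.1 [] (· ++ [p.2])) d) PySem.Dict.empty).contains m with _ | _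
  · have h0 := PySem.Dict.getD_of_not_contains _ ([] : List String) h
    rw [h0] at hA
    have : ¬ (∃ c ∈ cd, ∃ p ∈ pvItems c, p.1 = m ∧ p.2 ≠ "—") := by
      rintro ⟨c, hc, p, hp, h1, h2⟩
      have : p.2 ∈ cd.flatMap (fun c => ((pvItems c).filter (fun p => p.1 == m)).map (·.2)) := by
        simp only [List.mem_flatMap, List.mem_map, List.mem_filter]
        exact ⟨c, hc, p, ⟨hp, by simp [h1]⟩, rfl⟩
      rw [← hA] at this
      simp at this
    rw [h, Bool.false_and]
    symm
    simpa using this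
  · rw [h, Bool.true_and, hA, Bool.eq_iff_iff]
    simp only [List.any_eq_true, List.mem_flatMap, List.mem_filter, List.mem_map, decide_eq_true_eq]
    constructor
    · rintro ⟨v, ⟨c, hc, p, ⟨hp, hk⟩, rfl⟩, hv⟩
      exact ⟨c, hc, p, hp, by simpa using hk, by simpa using hv⟩
    · rintro ⟨c, hc, p, hp, hk, hv⟩
      exact ⟨p.2, ⟨c, hc, p, ⟨hp, by simp [hk]⟩, rfl⟩, by simpa using hv⟩

-- B's filtered flagged table splits into A's two staged filter loops
theorem labels_split (h : String → Bool) (ii : Bool) :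
    (pvLabels.filter (fun l => (ii || !l.2) && h l.1)).map (·.1)
      = pvOptional.filter h ++ (if ii then (["Commission", "Revenue"].filter h) else []) := by
  have hsplit : pvLabels
      = pvOptional.map (fun m => (m, false)) ++ ["Commission", "Revenue"].map (fun m => (m, true)) := rfl
  rw [hsplit, List.filter_append, List.map_append, List.filter_map, List.filter_map,
    List.map_map, List.map_map]
  cases ii <;> simp [Function.comp_def]

-- ===== VERDICT =====
theorem get_generic_metrics_py_spec : Claim_equal_get_generic_metrics_py := by
  intro cd ii _ _
  unfold Spec_get_generic_metrics_py get_generic_metrics_py get_generic_metrics_py_alt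
  simp only [PySem.List.foldl_append_if_eq_filter]
  rw [List.filter_congr (fun m _ => cond_eq cd m), List.filter_congr (fun m _ => cond_eq cd m),
    labels_split]
  cases ii <;> simp
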